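-- pv_equiv track=rewrite | github.com/mikereil80/cs115 | hw2.py | validword
-- ===== SOURCE A (Python) =====
-- def validword(Rack, M):
--             if M==[]:
--                 return []
--             elif len(M)<1:
--                 return []
--             elif M[0][0] in Rack and len(M[0])>=1:
--                 if len(M[0])>1:
--                     [Long]=[M[0]]
--                     if len(Long[0])==1:
--                         if doublecheck(Rack, Long)==True:
--                             return [True]+validword(Rack, M[1:])
--                         else:
--                             return [False]+validword(Rack, M[1:])
--                     else:
--                         return validword(Rack, Long[1:])
--                 else:
--                     return [True]+validword(Rack, M[1:])
--             else:
--                 return [False] + validword(Rack, M[1:])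
--
-- def doublecheck(Rack, char):
--     if char==[]:
--         return []
--     elif char[0] in Rack:
--         if len(char)==1:
--             return True
--         else:
--             return doublecheck(Rack, char[1:])
--     else:
--         return False
-- ===== SOURCE B (Python) =====
-- def validword(Rack, M):
--     return [all(c in Rack for c in w) for w in M]
-- ===== Notes on version B (the rewrite author's own statement) =====
-- stated objective: simpler
-- what changed: Replaced the branchy two-function recursion (with its dead 'len(Long[0])!=1' restart branch and helper doublecheck) by a single comprehension computing all(c in Rack for c in w) per word.
import Mathlib
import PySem

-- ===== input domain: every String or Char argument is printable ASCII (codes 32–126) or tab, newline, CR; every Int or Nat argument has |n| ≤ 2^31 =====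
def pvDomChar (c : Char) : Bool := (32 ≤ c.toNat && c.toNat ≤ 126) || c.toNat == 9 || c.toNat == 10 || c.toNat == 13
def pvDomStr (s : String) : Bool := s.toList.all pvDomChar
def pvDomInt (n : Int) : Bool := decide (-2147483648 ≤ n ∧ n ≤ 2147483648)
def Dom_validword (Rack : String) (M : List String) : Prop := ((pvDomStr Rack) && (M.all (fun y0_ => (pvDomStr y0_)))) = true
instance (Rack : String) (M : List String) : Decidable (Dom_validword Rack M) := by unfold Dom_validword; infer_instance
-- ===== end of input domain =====

-- B is a one-line comprehension replacing A's branchy double recursion; same return value wherever A returns (Pre_ excludes A's IndexError on empty words).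

-- ===== PORT A =====
-- Python doublecheck: char is always a (nonempty) string here, so 'char==[]' is always False;
-- char[0] on "" would raise IndexError (unreachable: only called with len(char) ≥ 2).
def doublecheckA (Rack : String) (char : List Char) : Bool :=
  match char with
  | [] => false  -- Python would raise IndexError here; never reached
  | c :: rest =>
    if PySem.Chars.isIn [c] Rack.toList then
      if (c :: rest).length == 1 then true
      else doublecheckA Rack rest
    else false

def validword (Rack : String) (M : List String) : List Bool :=
  match M with
  | [] => []  -- covers both 'M==[]' and the dead 'len(M)<1' branch
  | w :: rest =>
    match w.toList with
    | [] => []  -- Python: M[0][0] raises IndexError; excluded by Pre_validword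
    | c :: cs =>
      if PySem.Chars.isIn [c] Rack.toList && decide (1 ≤ (c :: cs).length) then
        if (c :: cs).length > 1 then
          -- [Long] = [M[0]]; Long[0] is the one-character string of c
          if (String.singleton c).toList.length == 1 then
            if doublecheckA Rack (c :: cs) == true
            then true :: validword Rack rest
            else false :: validword Rack rest
          else []  -- unreachable: a one-character string always has length 1
        else true :: validword Rack rest
      else false :: validword Rack rest

-- ===== PORT B =====
def validword_alt (Rack : String) (M : List String) : List Bool :=
  M.map (fun w => w.toList.all (fun c => PySem.Chars.isIn [c] Rack.toList))

-- ===== PRECONDITION & SPEC =====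
-- Pre_ excludes exactly the inputs where A raises IndexError (M[0][0] on an empty word): M containing the empty string.
def Pre_validword (Rack : String) (M : List String) : Prop := ∀ w ∈ M, w ≠ ""
instance (Rack : String) (M : List String) : Decidable (Pre_validword Rack M) := by unfold Pre_validword; infer_instance

def pvWitness_validword : String × List String := ("abc", ["ab", "c", "xz"])

def Spec_validword (Rack : String) (M : List String) (out : List Bool) : Prop := out = validword_alt Rack M
instance (Rack : String) (M : List String) (out : List Bool) : Decidable (Spec_validword Rack M out) := by unfold Spec_validword; infer_instance

-- ===== CLAIM (what is proved, stated in full; the proofs are below) =====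
def Claim_equal_validword : Prop := ∀ (Rack : String) (M : List String), Dom_validword Rack M → Pre_validword Rack M → Spec_validword Rack M (validword Rack M)

-- ===== LEMMAS AND PROOFS =====

theorem doublecheckA_eq_all (Rack : String) (cs : List Char) (c : Char) :
    doublecheckA Rack (c :: cs) = (c :: cs).all (fun c => PySem.Chars.isIn [c] Rack.toList) := by
  induction cs generalizing c with
  | nil => simp [doublecheckA]
  | cons c' cs' ih =>
    rw [doublecheckA]
    by_cases h : PySem.Chars.isIn [c] Rack.toList
    · simp [h, ih c']
    · simp [h]

theorem toList_ne_nil_of_ne_empty (w : String) (h : w ≠ "") : w.toList ≠ [] := by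
  simpa [String.toList_eq_nil_iff] using h

theorem validword_eq_alt (Rack : String) (M : List String) (hpre : ∀ w ∈ M, w ≠ "") :
    validword Rack M = validword_alt Rack M := by
  induction M with
  | nil => rfl
  | cons w rest ih =>
    have hw : w.toList ≠ [] := toList_ne_nil_of_ne_empty w (hpre w (by simp))
    have hrest : validword Rack rest = validword_alt Rack rest :=
      ih (fun x hx => hpre x (by simp [hx]))
    rw [validword]
    cases hwl : w.toList with
    | nil => exact absurd hwl hw
    | cons c cs =>
      by_cases hc : PySem.Chars.isIn [c] Rack.toList
      · cases cs with
        | nil => simp [validword_alt, hwl, hc, hrest, validword_alt]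
        | cons c' cs' =>
          simp [validword_alt, hwl, hc, hrest, doublecheckA_eq_all]
          split_ifs with h2 <;> simp_all
      · simp [validword_alt, hwl, hc, hrest]

-- ===== VERDICT (by name: the statement is the Claim_ definition above) =====
theorem validword_spec : Claim_equal_validword := by
  intro Rack M _ hpre
  unfold Spec_validword
  exact validword_eq_alt Rack M hpre
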